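-- pv_equiv track=rewrite | github.com/SuheyC/practicaSLD | sdl_practice.py | resolver_proteina_animal
-- ===== SOURCE A (Python) =====
-- proteina_animal = [
--     "pollo", "res", "cerdo", "pescado", "camaron", "huevo", "atun",
--     "carne_res", "carne_molida", "chicharron", "pechuga", "pechugas",
--     "filete", "pescado_blanco", "filete_de_pescado", "carne_de_cerdo",
--     "carne_de_res", "milanesas_de_res", "carne"
-- ]
--
-- def unificar(x, y, sustitucion=None):
--     if sustitucion is None:
--         sustitucion = {}
--     if x == y:
--         return sustitucion
--     if isinstance(x, str) and x[0].isupper():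
--         return unificar_var(x, y, sustitucion)
--     if isinstance(y, str) and y[0].isupper():
--         return unificar_var(y, x, sustitucion)
--     return None
--
-- def unificar_var(var, valor, sustitucion):
--     if var in sustitucion:
--         return unificar(sustitucion[var], valor, sustitucion)
--     elif isinstance(valor, str) and valor[0].isupper() and valor in sustitucion:
--         return unificar(var, sustitucion[valor], sustitucion)
--     else:
--         nueva = sustitucion.copy()
--         nueva[var] = valor
--         return nueva
--
-- def resolver_proteina_animal(receta):
--     sustituciones = []
--     for grupo, items in receta["ingredientes"].items():
--         for ing in items.keys():
--             base = ing.split("_")[0]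
--             for p in proteina_animal:
--                 subs = unificar(base, p)
--                 if subs is not None:
--                     sustituciones.append(subs)
--     return sustituciones
-- ===== SOURCE B (Python) =====
-- proteina_animal = [
--     "pollo", "res", "cerdo", "pescado", "camaron", "huevo", "atun",
--     "carne_res", "carne_molida", "chicharron", "pechuga", "pechugas",
--     "filete", "pescado_blanco", "filete_de_pescado", "carne_de_cerdo",
--     "carne_de_res", "milanesas_de_res", "carne"
-- ]
--
-- _proteinas = set(proteina_animal)
--
-- def resolver_proteina_animal(receta):
--     sustituciones = []
--     for items in receta["ingredientes"].values():
--         for ing in items: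
--             base = ing.split("_")[0]
--             if base[0].isupper():
--                 sustituciones.extend({base: p} for p in proteina_animal)
--             elif base in _proteinas:
--                 sustituciones.append({})
--     return sustituciones
-- ===== Notes on version B (the rewrite author's own statement) =====
-- stated objective: simpler
-- what changed: Drops the generic unificar/unificar_var unification helpers entirely: B inlines the only two reachable outcomes per ingredient (uppercase-first base -> one {base: p} dict per protein via a comprehension; otherwise a single {} iff base is in a precomputed set of proteins), replacing the 19 unify calls and inner scan per ingredient.
import Mathlib
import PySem

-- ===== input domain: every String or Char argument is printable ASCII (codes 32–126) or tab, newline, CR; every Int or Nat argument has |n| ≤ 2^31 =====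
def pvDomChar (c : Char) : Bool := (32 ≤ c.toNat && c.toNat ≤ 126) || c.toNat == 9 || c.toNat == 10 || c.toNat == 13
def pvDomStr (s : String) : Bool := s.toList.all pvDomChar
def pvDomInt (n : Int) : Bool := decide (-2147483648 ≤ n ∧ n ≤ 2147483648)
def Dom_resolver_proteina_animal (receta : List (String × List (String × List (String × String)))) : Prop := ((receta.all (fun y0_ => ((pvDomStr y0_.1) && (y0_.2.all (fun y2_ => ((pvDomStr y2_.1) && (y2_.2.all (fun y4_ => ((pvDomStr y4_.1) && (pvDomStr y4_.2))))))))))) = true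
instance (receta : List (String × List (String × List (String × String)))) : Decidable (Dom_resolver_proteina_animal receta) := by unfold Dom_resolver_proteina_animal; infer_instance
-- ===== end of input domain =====

-- B drops the generic unificar/unificar_var helpers and inlines the only reachable outcomes
-- per ingredient (objective: simpler).

-- ===== PORT A =====
def pvProteinaAnimal : List String := [
  "pollo", "res", "cerdo", "pescado", "camaron", "huevo", "atun",
  "carne_res", "carne_molida", "chicharron", "pechuga", "pechugas",
  "filete", "pescado_blanco", "filete_de_pescado", "carne_de_cerdo",
  "carne_de_res", "milanesas_de_res", "carne"]

-- unificar / unificar_var, transliterated. In this program both arguments are always strings,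
-- so the isinstance guards are True. The Nat fuel only makes the mutual recursion total; the
-- top-level call uses fuel 4 and the recursion depth from an empty substitution is at most 2,
-- so fuel is never exhausted on a reachable call. 'none' at an empty string is Python's
-- IndexError at x[0]/valor[0]; those inputs are outside Pre_.
mutual
def pvUnificar : Nat → String → String → PySem.Dict String String → Option (PySem.Dict String String)
  | 0, _, _, _ => none
  | fuel+1, x, y, sust =>
    if x == y then some sust
    else match x.toList with
      | [] => none  -- IndexError at x[0]
      | c :: _ =>
        if PySem.Chars.isupper c then pvUnificarVar fuel x y sust
        else match y.toList with
          | [] => none  -- IndexError at y[0]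
          | d :: _ => if PySem.Chars.isupper d then pvUnificarVar fuel y x sust else none
def pvUnificarVar : Nat → String → String → PySem.Dict String String → Option (PySem.Dict String String)
  | 0, _, _, _ => none
  | fuel+1, var, valor, sust =>
    if sust.contains var then pvUnificar fuel (sust.getD var "") valor sust
    else match valor.toList with
      | [] => none  -- IndexError at valor[0]
      | d :: _ =>
        if PySem.Chars.isupper d && sust.contains valor then pvUnificar fuel var (sust.getD valor "") sust
        else some (sust.insert var valor)
end

def resolver_proteina_animal (receta : List (String × List (String × List (String × String)))) : List (List (String × String)) :=
  match (PySem.Dict.ofList receta).get? "ingredientes" with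
  | none => []  -- Python raises KeyError here; outside Pre_
  | some ingredientes =>
    (PySem.Dict.ofList ingredientes).items.foldl (fun sustituciones gi =>
      (PySem.Dict.ofList gi.2).keys.foldl (fun sustituciones ing =>
        let base := ((PySem.Str.split? ing "_").getD []).headD ""
        pvProteinaAnimal.foldl (fun sustituciones p =>
          match pvUnificar 4 base p PySem.Dict.empty with
          | some subs => sustituciones ++ [subs.items]
          | none => sustituciones) sustituciones) sustituciones) []

-- ===== PORT B =====
def pvProteinasB : List String := [
  "pollo", "res", "cerdo", "pescado", "camaron", "huevo", "atun",
  "carne_res", "carne_molida", "chicharron", "pechuga", "pechugas",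
  "filete", "pescado_blanco", "filete_de_pescado", "carne_de_cerdo",
  "carne_de_res", "milanesas_de_res", "carne"]

def pvProteinaSet : List String := PySem.Set.ofList pvProteinasB

def resolver_proteina_animal_alt (receta : List (String × List (String × List (String × String)))) : List (List (String × String)) :=
  match (PySem.Dict.ofList receta).get? "ingredientes" with
  | none => []  -- Python raises KeyError here; outside Pre_
  | some m =>
    (PySem.Dict.ofList m).values.foldl (fun acc items =>
      (PySem.Dict.ofList items).keys.foldl (fun acc ing =>
        let base := ((PySem.Str.split? ing "_").getD []).headD ""
        match base.toList with
        | [] => acc  -- Python raises IndexError at base[0]; outside Pre_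
        | c :: _ =>
          if PySem.Chars.isupper c then
            acc ++ pvProteinasB.map (fun p => [(base, p)])
          else if pvProteinaSet.contains base then acc ++ [[]]
          else acc) acc) []

-- ===== PRECONDITION & SPEC =====
-- Pre_ = exactly the inputs where the Python returns: the key "ingredientes" is present
-- (else KeyError) and every ingredient name starts with a character other than '_'
-- (an empty name or a leading '_' gives an empty base and IndexError at base[0]).
def Pre_resolver_proteina_animal (receta : List (String × List (String × List (String × String)))) : Prop :=
  (match (PySem.Dict.ofList receta).get? "ingredientes" with
   | none => false
   | some m => (PySem.Dict.ofList m).values.all (fun items =>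
       (PySem.Dict.ofList items).keys.all (fun ing =>
         match ing.toList with
         | [] => false
         | c :: _ => c != '_'))) = true
instance (receta : List (String × List (String × List (String × String)))) : Decidable (Pre_resolver_proteina_animal receta) := by unfold Pre_resolver_proteina_animal; infer_instance

def pvWitness_resolver_proteina_animal : (List (String × List (String × List (String × String)))) :=
  [("ingredientes", [("plato_fuerte", [("pollo", "2"), ("Proteina", "1")])])]

def Spec_resolver_proteina_animal (receta : List (String × List (String × List (String × String)))) (out : List (List (String × String))) : Prop := out = resolver_proteina_animal_alt receta
instance (receta : List (String × List (String × List (String × String)))) (out : List (List (String × String))) : Decidable (Spec_resolver_proteina_animal receta out) := by unfold Spec_resolver_proteina_animal; infer_instance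

-- ===== CLAIM (what is proved, stated in full; the proofs are below) =====
def Claim_equal_resolver_proteina_animal : Prop := ∀ (receta : List (String × List (String × List (String × String)))), Dom_resolver_proteina_animal receta → Pre_resolver_proteina_animal receta → Spec_resolver_proteina_animal receta (resolver_proteina_animal receta)

-- ===== LEMMAS AND PROOFS =====

-- the per-protein loop body of port A, abstracted over the ingredient base
def pvStepA (base : String) (acc : List (List (String × String))) (p : String) : List (List (String × String)) :=
  match pvUnificar 4 base p PySem.Dict.empty with
  | some subs => acc ++ [subs.items]
  | none => acc

-- every protein name is nonempty and starts with a non-uppercase character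
def pvLowHead (p : String) : Bool :=
  match p.toList with
  | [] => false
  | d :: _ => !PySem.Chars.isupper d

lemma pvLowHead_proteinas : ∀ p ∈ pvProteinaAnimal, pvLowHead p = true := by decide

lemma pvUnificar_eq (base p : String) (h : base = p) :
    pvUnificar 4 base p PySem.Dict.empty = some PySem.Dict.empty := by
  simp [pvUnificar, h]

lemma pvUnificar_upper (base : String) (c : Char) (rest : List Char)
    (hb : base.toList = c :: rest) (hc : PySem.Chars.isupper c = true)
    (p : String) (hp : pvLowHead p = true) :
    pvUnificar 4 base p PySem.Dict.empty = some (PySem.Dict.empty.insert base p) := by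
  have hne : (base == p) = false := by
    apply beq_eq_false_iff_ne.mpr
    intro h
    rw [h] at hb
    simp [pvLowHead, hb, hc] at hp
  obtain ⟨d, t, hd, hdu⟩ : ∃ d t, p.toList = d :: t ∧ PySem.Chars.isupper d = false := by
    unfold pvLowHead at hp
    cases hpl : p.toList with
    | nil => rw [hpl] at hp; simp at hp
    | cons d t => rw [hpl] at hp; simp at hp; exact ⟨d, t, rfl, hp⟩
  simp [pvUnificar, hne, hb, hc, pvUnificarVar, hd, hdu]

lemma pvUnificar_low_ne (base : String) (c : Char) (rest : List Char)
    (hb : base.toList = c :: rest) (hc : PySem.Chars.isupper c = false)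
    (p : String) (hp : pvLowHead p = true) (hne : base ≠ p) :
    pvUnificar 4 base p PySem.Dict.empty = none := by
  obtain ⟨d, t, hd, hdu⟩ : ∃ d t, p.toList = d :: t ∧ PySem.Chars.isupper d = false := by
    unfold pvLowHead at hp
    cases hpl : p.toList with
    | nil => rw [hpl] at hp; simp at hp
    | cons d t => rw [hpl] at hp; simp at hp; exact ⟨d, t, rfl, hp⟩
  simp [pvUnificar, beq_eq_false_iff_ne.mpr hne, hb, hc, hd, hdu]

lemma pvUnificar_empty (base : String) (hb : base.toList = [])
    (p : String) (hp : pvLowHead p = true) :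
    pvUnificar 4 base p PySem.Dict.empty = none := by
  have hne : (base == p) = false := by
    apply beq_eq_false_iff_ne.mpr
    intro h
    rw [h] at hb
    simp [pvLowHead, hb] at hp
  simp [pvUnificar, hne, hb]

lemma pvFold_none (base : String) :
    ∀ (ps : List String), (∀ p ∈ ps, pvUnificar 4 base p PySem.Dict.empty = none) →
    ∀ acc, ps.foldl (pvStepA base) acc = acc := by
  intro ps
  induction ps with
  | nil => intro _ acc; rfl
  | cons p ps ih =>
    intro h acc
    simp only [List.foldl_cons]
    rw [show pvStepA base acc p = acc by simp [pvStepA, h p (by simp)]]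
    exact ih (fun q hq => h q (by simp [hq])) acc

lemma pvFold_upper (base : String) (c : Char) (rest : List Char)
    (hb : base.toList = c :: rest) (hc : PySem.Chars.isupper c = true) :
    ∀ (ps : List String), (∀ p ∈ ps, pvLowHead p = true) →
    ∀ acc, ps.foldl (pvStepA base) acc = acc ++ ps.map (fun p => [(base, p)]) := by
  intro ps
  induction ps with
  | nil => intro _ acc; simp
  | cons p ps ih =>
    intro h acc
    simp only [List.foldl_cons, List.map_cons]
    rw [show pvStepA base acc p = acc ++ [[(base, p)]] by
      simp only [pvStepA, pvUnificar_upper base c rest hb hc p (h p (by simp))]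
      simp [PySem.Dict.insert, PySem.Dict.empty, PySem.Dict.contains]]
    rw [ih (fun q hq => h q (by simp [hq])) (acc ++ [[(base, p)]])]
    simp

lemma pvFold_low (base : String) (c : Char) (rest : List Char)
    (hb : base.toList = c :: rest) (hc : PySem.Chars.isupper c = false) :
    ∀ (ps : List String), (∀ p ∈ ps, pvLowHead p = true) → ps.Nodup →
    ∀ acc, ps.foldl (pvStepA base) acc = acc ++ (if ps.contains base then [[]] else []) := by
  intro ps
  induction ps with
  | nil => intro _ _ acc; simp
  | cons p ps ih =>
    intro h hnd acc
    simp only [List.foldl_cons]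
    by_cases heq : base = p
    · have hnotin : base ∉ ps := heq ▸ (List.nodup_cons.mp hnd).1
      rw [show pvStepA base acc p = acc ++ [[]] by
        simp only [pvStepA, pvUnificar_eq base p heq]
        simp [PySem.Dict.empty]]
      rw [pvFold_none base ps (fun q hq => pvUnificar_low_ne base c rest hb hc q
        (h q (by simp [hq])) (fun hbq => hnotin (hbq ▸ hq)))]
      simp [heq]
    · rw [show pvStepA base acc p = acc by
        simp [pvStepA, pvUnificar_low_ne base c rest hb hc p (h p (by simp)) heq]]
      rw [ih (fun q hq => h q (by simp [hq])) (List.nodup_cons.mp hnd).2 acc]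
      simp [heq]

lemma pvSet_eq : pvProteinaSet = pvProteinaAnimal := by decide

lemma pvB_eq_A : pvProteinasB = pvProteinaAnimal := rfl

lemma pvStep_eq (base : String) (acc : List (List (String × String))) :
    pvProteinaAnimal.foldl (pvStepA base) acc =
      match base.toList with
      | [] => acc
      | c :: _ =>
        if PySem.Chars.isupper c then acc ++ pvProteinasB.map (fun p => [(base, p)])
        else if pvProteinaSet.contains base then acc ++ [[]]
        else acc := by
  cases hb : base.toList with
  | nil =>
    exact pvFold_none base pvProteinaAnimal
      (fun p hp => pvUnificar_empty base hb p (pvLowHead_proteinas p hp)) acc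
  | cons c rest =>
    by_cases hc : PySem.Chars.isupper c = true
    · rw [pvFold_upper base c rest hb hc pvProteinaAnimal pvLowHead_proteinas acc]
      simp [hc, pvB_eq_A]
    · rw [pvFold_low base c rest hb (by simpa using hc) pvProteinaAnimal pvLowHead_proteinas
        (by decide) acc]
      rw [pvSet_eq]
      simp only [Bool.not_eq_true] at hc
      simp [hc]
      split <;> simp

-- ===== VERDICT (by name: the statement is the Claim_ definition above) =====
theorem resolver_proteina_animal_spec : Claim_equal_resolver_proteina_animal := by
  intro receta _ _
  unfold Spec_resolver_proteina_animal resolver_proteina_animal resolver_proteina_animal_alt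
  cases hm : (PySem.Dict.ofList receta).get? "ingredientes" with
  | none => rfl
  | some m =>
    show List.foldl _ [] (PySem.Dict.ofList m).items = List.foldl _ [] (PySem.Dict.ofList m).values
    rw [show (PySem.Dict.ofList m).values = (PySem.Dict.ofList m).items.map (·.2) from rfl,
      List.foldl_map]
    apply List.foldl_ext
    intro acc gi _
    apply List.foldl_ext
    intro acc2 ing _
    exact pvStep_eq (((PySem.Str.split? ing "_").getD []).headD "") acc2
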